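-- pv_equiv track=rewrite | github.com/WydD/kana-test | kana-test.py | find_error
-- ===== SOURCE A (Python) =====
-- def find_error(answer, roma):
--     current = None
--     result = answer+"*"
--     correct = roma
--     for i in range(0, min(len(answer), len(roma))):
--         if answer[i] == roma[i]:
--             continue
--         if current is None:
--             current = [i, i]
--             result = answer[:i]
--             correct = roma[:i]
--         elif i - 1 == current[1]:
--             current[1] = i
--         else:
--             result += "[" + answer[current[0]:(current[1] + 1)] + "]" + answer[(current[1] + 1):i]
--             correct += " " + roma[current[0]:(current[1] + 1)] + " " + roma[(current[1] + 1):i]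
--             current = [i, i]
--     if current is not None:
--         result += "["+answer[current[0]:(current[1]+1)]+"]"+answer[(current[1]+1):]
--         correct += " "+roma[current[0]:(current[1]+1)]+" " + roma[(current[1]+1):]
--     return result, correct
-- ===== SOURCE B (Python) =====
-- def find_error(answer, roma):
--     n = min(len(answer), len(roma))
--     # phase 1: collect the maximal runs of mismatching positions as (start, end) pairs
--     runs = []
--     i = 0
--     while i < n:
--         if answer[i] != roma[i]:
--             j = i
--             while j + 1 < n and answer[j + 1] != roma[j + 1]:
--                 j += 1
--             runs.append((i, j))
--             i = j + 1
--         else: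
--             i += 1
--     if not runs:
--         return answer + "*", roma
--     # phase 2: render the runs
--     result = answer[:runs[0][0]]
--     correct = roma[:runs[0][0]]
--     for (s, e), (nxt, _) in zip(runs, runs[1:]):
--         result += "[" + answer[s:e + 1] + "]" + answer[e + 1:nxt]
--         correct += " " + roma[s:e + 1] + " " + roma[e + 1:nxt]
--     s, e = runs[-1]
--     result += "[" + answer[s:e + 1] + "]" + answer[e + 1:]
--     correct += " " + roma[s:e + 1] + " " + roma[e + 1:]
--     return result, correct
-- ===== Notes on version B (the rewrite author's own statement) =====
-- stated objective: alternative
-- what changed: B replaces A's one-pass state machine (an open-run accumulator current=[s,e] updated while building the output strings) by two phases: first collect the maximal mismatch runs as (start,end) pairs with a nested scan, then render all runs in a separate pass over the runs list.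
import Mathlib
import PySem

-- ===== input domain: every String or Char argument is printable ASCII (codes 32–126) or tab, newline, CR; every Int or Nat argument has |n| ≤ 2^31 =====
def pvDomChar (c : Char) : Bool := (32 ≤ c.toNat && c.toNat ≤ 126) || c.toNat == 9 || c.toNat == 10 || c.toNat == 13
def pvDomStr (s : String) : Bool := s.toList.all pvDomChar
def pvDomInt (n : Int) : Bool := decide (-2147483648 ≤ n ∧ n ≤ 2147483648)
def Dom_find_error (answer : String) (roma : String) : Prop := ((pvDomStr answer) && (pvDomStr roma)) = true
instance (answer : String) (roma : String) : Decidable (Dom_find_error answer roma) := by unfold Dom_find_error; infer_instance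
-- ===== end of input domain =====

-- B replaces A's one-pass open-run state machine by two phases (collect mismatch runs, then
-- render them); same cost, alternative structure. Equivalence is proved on all inputs.

-- ===== PORT A =====
-- loop body of A: state = (current, result, correct), index i
def pvStepA (a r : List Char) (st : Option (Int × Int) × List Char × List Char) (i : Int) :
    Option (Int × Int) × List Char × List Char :=
  if PySem.List.pyGetD a i ' ' = PySem.List.pyGetD r i ' ' then st
  else
    match st with
    | (none, _res, _cor) =>
        (some (i, i), PySem.List.slice a none (some i), PySem.List.slice r none (some i))
    | (some (s, e), res, cor) =>
        if i - 1 = e then (some (s, i), res, cor)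
        else
          (some (i, i),
           res ++ ['['] ++ PySem.List.slice a (some s) (some (e + 1)) ++ [']'] ++
             PySem.List.slice a (some (e + 1)) (some i),
           cor ++ [' '] ++ PySem.List.slice r (some s) (some (e + 1)) ++ [' '] ++
             PySem.List.slice r (some (e + 1)) (some i))

def find_error (answer : String) (roma : String) : String × String :=
  let a := answer.toList
  let r := roma.toList
  let st := (PySem.List.pyRange 0 (min (a.length : Int) (r.length : Int)) 1).foldl
              (pvStepA a r) (none, a ++ ['*'], r)
  match st with
  | (none, res, cor) => (String.ofList res, String.ofList cor)
  | (some (s, e), res, cor) =>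
      (String.ofList (res ++ ['['] ++ PySem.List.slice a (some s) (some (e + 1)) ++ [']'] ++
         PySem.List.slice a (some (e + 1)) none),
       String.ofList (cor ++ [' '] ++ PySem.List.slice r (some s) (some (e + 1)) ++ [' '] ++
         PySem.List.slice r (some (e + 1)) none))

-- ===== PORT B =====
-- inner while of phase 1: grow the run ending at j while the next position also mismatches
def pvGrow (a r : List Char) (n : Nat) (j : Nat) : Nat :=
  if h : j + 1 < n ∧ ¬ (a.getD (j + 1) ' ' = r.getD (j + 1) ' ') then pvGrow a r n (j + 1)
  else j
termination_by n - j
decreasing_by omega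

-- needed by pvScan's termination
theorem pvGrow_ge (a r : List Char) (n j : Nat) : j ≤ pvGrow a r n j := by
  rw [pvGrow]
  split
  · exact Nat.le_trans (Nat.le_succ j) (pvGrow_ge a r n (j + 1))
  · exact Nat.le_refl j
termination_by n - j
decreasing_by omega

-- outer while of phase 1: collect the maximal mismatch runs from position i on
def pvScan (a r : List Char) (n : Nat) (i : Nat) : List (Nat × Nat) :=
  if h : i < n then
    if ¬ (a.getD i ' ' = r.getD i ' ') then
      (i, pvGrow a r n i) :: pvScan a r n (pvGrow a r n i + 1)
    else pvScan a r n (i + 1)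
  else []
termination_by n - i
decreasing_by
  · have := pvGrow_ge a r n i; omega
  · omega

-- body of the phase-2 for loop over zip(runs, runs[1:])
def pvRenderStep (a r : List Char) (acc : List Char × List Char)
    (pq : (Nat × Nat) × (Nat × Nat)) : List Char × List Char :=
  (acc.1 ++ ['['] ++ PySem.List.slice a (some (pq.1.1 : Int)) (some ((pq.1.2 : Int) + 1)) ++ [']'] ++
     PySem.List.slice a (some ((pq.1.2 : Int) + 1)) (some (pq.2.1 : Int)),
   acc.2 ++ [' '] ++ PySem.List.slice r (some (pq.1.1 : Int)) (some ((pq.1.2 : Int) + 1)) ++ [' '] ++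
     PySem.List.slice r (some ((pq.1.2 : Int) + 1)) (some (pq.2.1 : Int)))

def find_error_alt (answer : String) (roma : String) : String × String :=
  let a := answer.toList
  let r := roma.toList
  let n := min a.length r.length
  let runs := pvScan a r n 0
  match runs with
  | [] => (String.ofList (a ++ ['*']), String.ofList r)
  | (s0, _) :: _ =>
      let acc := (runs.zip (PySem.List.slice runs (some 1) none)).foldl (pvRenderStep a r)
                   (PySem.List.slice a none (some (s0 : Int)), PySem.List.slice r none (some (s0 : Int)))
      let last := PySem.List.pyGetD runs (-1) (0, 0)
      (String.ofList (acc.1 ++ ['['] ++ PySem.List.slice a (some (last.1 : Int)) (some ((last.2 : Int) + 1)) ++ [']'] ++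
         PySem.List.slice a (some ((last.2 : Int) + 1)) none),
       String.ofList (acc.2 ++ [' '] ++ PySem.List.slice r (some (last.1 : Int)) (some ((last.2 : Int) + 1)) ++ [' '] ++
         PySem.List.slice r (some ((last.2 : Int) + 1)) none))

-- ===== PRECONDITION & SPEC =====
def Spec_find_error (answer : String) (roma : String) (out : String × String) : Prop := out = find_error_alt answer roma
instance (answer : String) (roma : String) (out : String × String) : Decidable (Spec_find_error answer roma out) := by unfold Spec_find_error; infer_instance

-- ===== CLAIM (what is proved, stated in full; the proofs are below) =====
def Claim_equal_find_error : Prop := ∀ (answer : String) (roma : String), Dom_find_error answer roma → Spec_find_error answer roma (find_error answer roma)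

-- ===== LEMMAS AND PROOFS =====

-- common building blocks of both outputs
def pvSeg (x : List Char) (s e : Nat) : List Char := (x.drop s).take (e + 1 - s)
def pvGap (x : List Char) (e j : Nat) : List Char := (x.drop (e + 1)).take (j - (e + 1))

-- what A's loop appends after the first mismatch, indexed by the remaining mismatch positions
def pvEmit (x : List Char) (c1 c2 : Char) (s e : Nat) : List Nat → List Char
  | [] => [c1] ++ pvSeg x s e ++ [c2] ++ x.drop (e + 1)
  | j :: t =>
      if j = e + 1 then pvEmit x c1 c2 s j t
      else [c1] ++ pvSeg x s e ++ [c2] ++ pvGap x e j ++ pvEmit x c1 c2 j j t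

-- the same text indexed by the remaining runs
def pvEmitRuns (x : List Char) (c1 c2 : Char) (s e : Nat) : List (Nat × Nat) → List Char
  | [] => [c1] ++ pvSeg x s e ++ [c2] ++ x.drop (e + 1)
  | (s', e') :: t => [c1] ++ pvSeg x s e ++ [c2] ++ pvGap x e s' ++ pvEmitRuns x c1 c2 s' e' t

-- grouping of a mismatch-index list into runs
def pvEat (e : Nat) : List Nat → Nat × List Nat
  | [] => (e, [])
  | j :: t => if j = e + 1 then pvEat j t else (e, j :: t)

theorem pvEat_len (e : Nat) (t : List Nat) : (pvEat e t).2.length ≤ t.length := by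
  induction t generalizing e with
  | nil => simp [pvEat]
  | cons j t ih =>
      simp only [pvEat]
      split
      · exact Nat.le_trans (ih j) (Nat.le_succ _)
      · simp

def pvGroups : List Nat → List (Nat × Nat)
  | [] => []
  | i :: t => (i, (pvEat i t).1) :: pvGroups (pvEat i t).2
termination_by l => l.length
decreasing_by have := pvEat_len i t; simp; omega

-- mismatch action of A's loop body (the branch taken when the characters differ)
def pvStepM (a r : List Char) (st : Option (Int × Int) × List Char × List Char) (k : Nat) :
    Option (Int × Int) × List Char × List Char :=
  match st with
  | (none, _res, _cor) =>
      (some ((k : Int), (k : Int)), PySem.List.slice a none (some (k : Int)),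
       PySem.List.slice r none (some (k : Int)))
  | (some (s, e), res, cor) =>
      if (k : Int) - 1 = e then (some (s, (k : Int)), res, cor)
      else
        (some ((k : Int), (k : Int)),
         res ++ ['['] ++ PySem.List.slice a (some s) (some (e + 1)) ++ [']'] ++
           PySem.List.slice a (some (e + 1)) (some (k : Int)),
         cor ++ [' '] ++ PySem.List.slice r (some s) (some (e + 1)) ++ [' '] ++
           PySem.List.slice r (some (e + 1)) (some (k : Int)))

-- A's final flush
def pvFinish (a r : List Char) (st : Option (Int × Int) × List Char × List Char) :
    List Char × List Char :=
  match st with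
  | (none, res, cor) => (res, cor)
  | (some (s, e), res, cor) =>
      (res ++ ['['] ++ PySem.List.slice a (some s) (some (e + 1)) ++ [']'] ++
         PySem.List.slice a (some (e + 1)) none,
       cor ++ [' '] ++ PySem.List.slice r (some s) (some (e + 1)) ++ [' '] ++
         PySem.List.slice r (some (e + 1)) none)

theorem cast_succ (e : Nat) : ((e : Int) + 1) = (((e + 1 : Nat)) : Int) := by push_cast; ring

theorem pvStepA_eq (a r : List Char) (st : Option (Int × Int) × List Char × List Char) (k : Nat) :
    pvStepA a r st (k : Int) =
      if a.getD k ' ' = r.getD k ' ' then st else pvStepM a r st k := by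
  obtain ⟨c, res, cor⟩ := st
  cases c <;> simp [pvStepA, pvStepM, PySem.List.pyGetD_natCast]

-- A2: the fold over the remaining mismatch positions, flushed, appends exactly pvEmit
theorem pvFoldA (a r : List Char) (t : List Nat) (s e : Nat) (res cor : List Char) :
    pvFinish a r (t.foldl (pvStepM a r) (some ((s : Int), (e : Int)), res, cor))
      = (res ++ pvEmit a '[' ']' s e t, cor ++ pvEmit r ' ' ' ' s e t) := by
  induction t generalizing s e res cor with
  | nil =>
      simp only [List.foldl_nil, pvFinish, pvEmit, cast_succ,
        PySem.List.slice_natCast, PySem.List.slice_from_natCast, pvSeg]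
      simp
  | cons j t ih =>
      simp only [List.foldl_cons, pvStepM]
      split
      · next h =>
          have hj : j = e + 1 := by omega
          rw [ih]
          subst hj
          simp [pvEmit]
      · next h =>
          have hj : ¬ j = e + 1 := by omega
          rw [ih]
          simp only [pvEmit, if_neg hj, cast_succ, PySem.List.slice_natCast, pvSeg, pvGap]
          simp

-- L1: pvEmit is pvEmitRuns after grouping
theorem pvEmit_eq (x : List Char) (c1 c2 : Char) (t : List Nat) (s e : Nat) :
    pvEmit x c1 c2 s e t
      = pvEmitRuns x c1 c2 s (pvEat e t).1 (pvGroups (pvEat e t).2) := by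
  induction t generalizing s e with
  | nil => simp [pvEmit, pvEat, pvGroups, pvEmitRuns]
  | cons j t ih =>
      simp only [pvEmit, pvEat]
      split
      · next h => exact ih s j
      · next h =>
          rw [ih j j]
          simp only [pvGroups, pvEmitRuns]

-- G1: pvGrow computes what pvEat consumes from the filtered index list
theorem pvGrow_eat (a r : List Char) (n i : Nat) :
    pvEat i ((List.range' (i + 1) (n - (i + 1))).filter
        (fun k => decide (¬ a.getD k ' ' = r.getD k ' ')))
      = (pvGrow a r n i,
         (List.range' (pvGrow a r n i + 1) (n - (pvGrow a r n i + 1))).filter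
            (fun k => decide (¬ a.getD k ' ' = r.getD k ' '))) := by
  rw [pvGrow]
  split
  · next h =>
      have hr : n - (i + 1) = (n - (i + 1 + 1)) + 1 := by omega
      rw [hr, List.range'_succ]
      simp only [List.filter_cons, decide_eq_true_eq, if_pos h.2]
      simp only [pvEat]
      exact pvGrow_eat a r n (i + 1)
  · next h =>
      cases hu : (List.range' (i + 1) (n - (i + 1))).filter
          (fun k => decide (¬ a.getD k ' ' = r.getD k ' ')) with
      | nil => simp [pvEat]
      | cons j t =>
          have hj : j ∈ (List.range' (i + 1) (n - (i + 1))).filter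
              (fun k => decide (¬ a.getD k ' ' = r.getD k ' ')) := by
            rw [hu]; exact List.mem_cons_self
          have hmem := List.mem_filter.mp hj
          have hrange := List.mem_range'_1.mp hmem.1
          have hjne : j ≠ i + 1 := by
            intro hEq
            exact h ⟨by omega, by simpa [hEq] using hmem.2⟩
          simp [pvEat, hjne]
termination_by n - i
decreasing_by omega

-- L2: phase 1 computes the grouping of the mismatch-index list
theorem pvScan_eq (a r : List Char) (n i : Nat) :
    pvScan a r n i
      = pvGroups ((List.range' i (n - i)).filter
          (fun k => decide (¬ a.getD k ' ' = r.getD k ' '))) := by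
  rw [pvScan]
  split
  · next hin =>
      have hr : n - i = (n - (i + 1)) + 1 := by omega
      rw [hr, List.range'_succ]
      split
      · next hp =>
          simp only [List.filter_cons, decide_eq_true_eq, if_pos hp]
          rw [pvGroups]
          simp only [pvGrow_eat a r n i]
          rw [pvScan_eq a r n (pvGrow a r n i + 1)]
      · next hp =>
          simp only [List.filter_cons, decide_eq_true_eq, if_neg hp]
          exact pvScan_eq a r n (i + 1)
  · next hin =>
      have hr : n - i = 0 := by omega
      simp [hr, pvGroups]
termination_by n - i
decreasing_by
  all_goals (try (have hg := pvGrow_ge a r n i)); omega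

-- B2: phase 2 renders pvEmitRuns
theorem pvFoldB (a r : List Char) (t : List (Nat × Nat)) (s e : Nat) (accA accR : List Char) :
    (let runs := (s, e) :: t
     let acc := (runs.zip runs.tail).foldl (pvRenderStep a r) (accA, accR)
     let last := runs.getLast (by simp)
     (acc.1 ++ ['['] ++ PySem.List.slice a (some (last.1 : Int)) (some ((last.2 : Int) + 1)) ++ [']'] ++
        PySem.List.slice a (some ((last.2 : Int) + 1)) none,
      acc.2 ++ [' '] ++ PySem.List.slice r (some (last.1 : Int)) (some ((last.2 : Int) + 1)) ++ [' '] ++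
        PySem.List.slice r (some ((last.2 : Int) + 1)) none))
      = (accA ++ pvEmitRuns a '[' ']' s e t, accR ++ pvEmitRuns r ' ' ' ' s e t) := by
  induction t generalizing s e accA accR with
  | nil =>
      simp only [List.tail_cons, List.zip_nil_right, List.foldl_nil, List.getLast_singleton,
        pvEmitRuns, cast_succ, PySem.List.slice_natCast, PySem.List.slice_from_natCast, pvSeg]
      simp
  | cons q t ih =>
      obtain ⟨s', e'⟩ := q
      simp only [List.tail_cons, List.zip_cons_cons, List.foldl_cons]
      rw [List.getLast_cons (by simp)]
      have hstep := ih s' e'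
        (accA ++ ['['] ++ PySem.List.slice a (some (s : Int)) (some ((e : Int) + 1)) ++ [']'] ++
          PySem.List.slice a (some ((e : Int) + 1)) (some (s' : Int)))
        (accR ++ [' '] ++ PySem.List.slice r (some (s : Int)) (some ((e : Int) + 1)) ++ [' '] ++
          PySem.List.slice r (some ((e : Int) + 1)) (some (s' : Int)))
      simp only [List.tail_cons] at hstep
      rw [show pvRenderStep a r (accA, accR) ((s, e), (s', e')) =
        (accA ++ ['['] ++ PySem.List.slice a (some (s : Int)) (some ((e : Int) + 1)) ++ [']'] ++
          PySem.List.slice a (some ((e : Int) + 1)) (some (s' : Int)),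
         accR ++ [' '] ++ PySem.List.slice r (some (s : Int)) (some ((e : Int) + 1)) ++ [' '] ++
          PySem.List.slice r (some ((e : Int) + 1)) (some (s' : Int))) from rfl]
      rw [hstep]
      simp only [pvEmitRuns, cast_succ, PySem.List.slice_natCast, pvSeg, pvGap]
      simp

-- ===== VERDICT (by name: the statement is the Claim_ definition above) =====
set_option maxHeartbeats 1000000 in
theorem find_error_spec : Claim_equal_find_error := by
  intro answer roma _
  unfold Spec_find_error find_error find_error_alt
  simp only []
  rw [show (min ((answer.toList.length : Int)) ((roma.toList.length : Int)))
        = ((min answer.toList.length roma.toList.length : Nat) : Int) by simp [Nat.cast_min]]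
  rw [show PySem.List.pyRange 0 ((min answer.toList.length roma.toList.length : Nat) : Int) 1
        = List.map (fun k : Nat => (k : Int)) (List.range (min answer.toList.length roma.toList.length)) by
      rw [PySem.List.pyRange_one]
      simp only [Int.sub_zero, Int.toNat_natCast]
      exact List.map_congr_left (fun k _ => by simp)]
  rw [List.foldl_map]
  simp only [pvStepA_eq]
  rw [show (fun (x : Option (Int × Int) × List Char × List Char) (y : Nat) =>
        if answer.toList.getD y ' ' = roma.toList.getD y ' ' then x
        else pvStepM answer.toList roma.toList x y)
      = (fun x y =>
        if ¬ answer.toList.getD y ' ' = roma.toList.getD y ' '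
        then pvStepM answer.toList roma.toList x y else x) by
    funext st k; rw [ite_not]]
  rw [PySem.List.foldl_ite_eq_foldl_filter
        (fun y => ¬ answer.toList.getD y ' ' = roma.toList.getD y ' ')
        (pvStepM answer.toList roma.toList)]
  rw [pvScan_eq answer.toList roma.toList (min answer.toList.length roma.toList.length) 0,
      Nat.sub_zero, ← List.range_eq_range']
  cases hm : (List.range (min answer.toList.length roma.toList.length)).filter
      (fun k => decide (¬ answer.toList.getD k ' ' = roma.toList.getD k ' ')) with
  | nil => simp [pvGroups]
  | cons i t =>
      rw [List.foldl_cons]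
      rw [show pvStepM answer.toList roma.toList (none, answer.toList ++ ['*'], roma.toList) i
            = (some ((i : Int), (i : Int)), PySem.List.slice answer.toList none (some (i : Int)),
               PySem.List.slice roma.toList none (some (i : Int))) from rfl]
      rw [pvGroups]
      simp only [PySem.List.slice_from_one, List.tail_cons,
        PySem.List.pyGetD_neg_one _ (0, 0) (List.cons_ne_nil _ _)]
      have hB := pvFoldB answer.toList roma.toList (pvGroups (pvEat i t).2) i (pvEat i t).1
        (PySem.List.slice answer.toList none (some (i : Int)))
        (PySem.List.slice roma.toList none (some (i : Int)))
      simp only [List.tail_cons] at hB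
      have hA := pvFoldA answer.toList roma.toList t i i
        (PySem.List.slice answer.toList none (some (i : Int)))
        (PySem.List.slice roma.toList none (some (i : Int)))
      rcases hst : List.foldl (pvStepM answer.toList roma.toList)
          (some ((i : Int), (i : Int)), PySem.List.slice answer.toList none (some (i : Int)),
           PySem.List.slice roma.toList none (some (i : Int))) t with ⟨c, res, cor⟩
      rw [hst] at hA
      rw [Prod.mk.injEq] at hB
      obtain ⟨hB1, hB2⟩ := hB
      rw [hB1, hB2]
      cases c with
      | none =>
          simp only [pvFinish] at hA
          rw [Prod.mk.injEq] at hA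
          obtain ⟨hA1, hA2⟩ := hA
          simp only []
          rw [hA1, hA2, pvEmit_eq, pvEmit_eq]
      | some p =>
          obtain ⟨s, e⟩ := p
          simp only [pvFinish] at hA
          rw [Prod.mk.injEq] at hA
          obtain ⟨hA1, hA2⟩ := hA
          simp only []
          rw [hA1, hA2, pvEmit_eq, pvEmit_eq]
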